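-- pv_equiv track=rewrite | github.com/arbwasisi/CSC120 | pop_chg.py | compute_max
-- ===== SOURCE A (Python) =====
-- def compute_max(change_array, us_states):
--     '''
--     This function cumputes the maximum population change, and keeps track
--     of any tie. It stores the result in a list.
--     '''
--
--     maximum = change_array[0] # set maximum rate to first value in list
--     maximum_change = [change_array[0]]# list that will hold maximum rate
--     maximum_state = [us_states[0]]# list that will hold maximum states
--
--     # Check for maximum, and remove vaule in maximum_change list
--     # if maximum is less then current index value
--     for index in range(1,len(change_array)):
--         if change_array[index] >= maximum:
--             if change_array[index] > maximum:
--                 maximum = change_array[index]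
--                 maximum_change.append(maximum)
--                 maximum_state.append(us_states[index])
--                 del maximum_change[:-1]
--                 del maximum_state[:-1]
--             else: # checks for tie
--                 maximum = change_array[index]
--                 maximum_change.append(maximum)
--                 maximum_state.append(us_states[index])
--
--     return maximum_change, maximum_state
-- ===== SOURCE B (Python) =====
-- def compute_max(change_array, us_states):
--     '''
--     Two-pass version: find the maximum population change first, then
--     collect the states (in order) whose change equals it.
--     '''
--     m = max(change_array)
--     maximum_state = [us_states[i] for i, c in enumerate(change_array) if c == m]
--     return [m] * len(maximum_state), maximum_state
-- ===== Notes on version B (the rewrite author's own statement) =====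
-- stated objective: simpler
-- what changed: Replaced A's single accumulating scan with running maximum and list resets (append + del[:-1]) by a two-pass max-then-filter: compute m = max(change_array), then collect the states whose change equals m and replicate m to match.
import Mathlib
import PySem

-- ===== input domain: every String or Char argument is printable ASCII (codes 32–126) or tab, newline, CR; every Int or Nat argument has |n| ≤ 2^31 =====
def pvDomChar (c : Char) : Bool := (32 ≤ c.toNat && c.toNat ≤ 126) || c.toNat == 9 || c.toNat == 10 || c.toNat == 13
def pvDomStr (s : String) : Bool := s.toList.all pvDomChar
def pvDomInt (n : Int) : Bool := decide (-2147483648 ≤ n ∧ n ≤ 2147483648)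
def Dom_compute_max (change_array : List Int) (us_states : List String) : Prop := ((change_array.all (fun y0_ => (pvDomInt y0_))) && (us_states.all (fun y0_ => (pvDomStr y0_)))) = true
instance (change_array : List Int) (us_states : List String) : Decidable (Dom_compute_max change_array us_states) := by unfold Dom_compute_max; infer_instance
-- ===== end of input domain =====

-- B replaces A's single accumulating scan (running max with list resets) by a
-- two-pass max-then-filter decomposition; same result, simpler to read.


-- ===== PORT A =====
-- one loop step of A: compare change_array[index] with the running maximum,
-- reset the two lists on a strict new maximum, append on a tie
def computeMaxStep (change_array : List Int) (us_states : List String)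
    (s : Int × List Int × List String) (index : Int) : Int × List Int × List String :=
  let c := PySem.List.pyGetD change_array index 0
  if c ≥ s.1 then
    if c > s.1 then
      -- maximum = c; append then del[:-1] leaves the singleton of the new entry
      (c, [c], [PySem.List.pyGetD us_states index ""])
    else
      (c, s.2.1 ++ [c], s.2.2 ++ [PySem.List.pyGetD us_states index ""])
  else s

def compute_max (change_array : List Int) (us_states : List String) : List Int × List String :=
  let maximum := PySem.List.pyGetD change_array 0 0
  let maximum_change : List Int := [maximum]
  let maximum_state : List String := [PySem.List.pyGetD us_states 0 ""]
  let st := (PySem.List.pyRange 1 (change_array.length : Int)).foldl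
      (computeMaxStep change_array us_states) (maximum, maximum_change, maximum_state)
  (st.2.1, st.2.2)

-- ===== PORT B =====
def compute_max_alt (change_array : List Int) (us_states : List String) : List Int × List String :=
  let m := (PySem.List.max? change_array (fun y => y)).getD 0
  let maximum_state := (PySem.List.enumerate change_array 0).filterMap
      (fun p => if p.2 = m then some (PySem.List.pyGetD us_states p.1 "") else none)
  (List.replicate maximum_state.length m, maximum_state)

-- ===== PRECONDITION & SPEC =====
-- Pre_ excludes exactly the inputs on which Python A raises IndexError:
-- an empty change_array, or a prefix-maximal index of change_array with no
-- corresponding entry in us_states (those are the only us_states accesses).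
def Pre_compute_max (change_array : List Int) (us_states : List String) : Prop :=
  change_array ≠ [] ∧
  ∀ i, (h : i < change_array.length) →
    (∀ j, (hj : j < i) → change_array[j]'(by omega) ≤ change_array[i]) →
    i < us_states.length

instance (change_array : List Int) (us_states : List String) : Decidable (Pre_compute_max change_array us_states) := by
  unfold Pre_compute_max; infer_instance

def pvWitness_compute_max : List Int × List String := ([3, 1, 3], ["NY", "VT", "CA"])

def Spec_compute_max (change_array : List Int) (us_states : List String) (out : List Int × List String) : Prop := out = compute_max_alt change_array us_states
instance (change_array : List Int) (us_states : List String) (out : List Int × List String) : Decidable (Spec_compute_max change_array us_states out) := by unfold Spec_compute_max; infer_instance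

-- ===== CLAIM (what is proved, stated in full; the proofs are below) =====
def Claim_equal_compute_max : Prop := ∀ (change_array : List Int) (us_states : List String), Dom_compute_max change_array us_states → Pre_compute_max change_array us_states → Spec_compute_max change_array us_states (compute_max change_array us_states)

-- ===== LEMMAS AND PROOFS =====

-- the selected-states list B builds, as a function of the maximum m
def selStates (change_array : List Int) (us_states : List String) (m : Int) : List String :=
  (PySem.List.enumerate change_array 0).filterMap
      (fun p => if p.2 = m then some (PySem.List.pyGetD us_states p.1 "") else none)

-- Characterisation of A's loop state after scanning c0 :: rest:
-- the running maximum is the list maximum, maximum_change is that value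
-- replicated, and maximum_state is exactly B's filtered state list.
lemma computeMax_fold_char (rest : List Int) (c0 : Int) (us : List String) :
    (PySem.List.pyRange 1 ((c0 :: rest).length : Int)).foldl
        (computeMaxStep (c0 :: rest) us) (c0, [c0], [PySem.List.pyGetD us 0 ""])
      = (rest.foldl max c0,
         List.replicate (selStates (c0 :: rest) us (rest.foldl max c0)).length (rest.foldl max c0),
         selStates (c0 :: rest) us (rest.foldl max c0)) := by
  induction rest using List.reverseRecOn with
  | nil =>
      simp [selStates, PySem.List.pyRange, PySem.List.enumerate]
  | append_singleton rest' c ih =>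
      have hlen : ((c0 :: (rest' ++ [c])).length : Int) = ((c0 :: rest').length : Int) + 1 := by
        simp only [List.length_cons, List.length_append, List.length_nil]; push_cast; ring
      rw [hlen, PySem.List.pyRange_one_succ_right (by simp only [List.length_cons]; omega),
          List.foldl_append]
      -- the earlier steps read only indices < (c0 :: rest').length, so the
      -- appended element does not change them
      have hcongr :
          (PySem.List.pyRange 1 ((c0 :: rest').length : Int)).foldl
              (computeMaxStep (c0 :: (rest' ++ [c])) us) (c0, [c0], [PySem.List.pyGetD us 0 ""])
            = (PySem.List.pyRange 1 ((c0 :: rest').length : Int)).foldl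
              (computeMaxStep (c0 :: rest') us) (c0, [c0], [PySem.List.pyGetD us 0 ""]) := by
        refine PySem.List.foldl_congr_mem _ _ _ _ ?_
        intro acc i hi
        rcases PySem.List.mem_pyRange_one.mp hi with ⟨h1, h2⟩
        obtain ⟨k, rfl⟩ : ∃ k : Nat, i = (k : Int) := ⟨i.toNat, (Int.toNat_of_nonneg (by omega)).symm⟩
        have hk : k < (c0 :: rest').length := by exact_mod_cast h2
        have hget : PySem.List.pyGetD (c0 :: (rest' ++ [c])) (k : Int) 0
            = PySem.List.pyGetD (c0 :: rest') (k : Int) 0 := by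
          rw [PySem.List.pyGetD_natCast, PySem.List.pyGetD_natCast,
              show (c0 :: (rest' ++ [c])) = (c0 :: rest') ++ [c] by simp]
          simp only [List.getD_eq_getElem?_getD]
          rw [List.getElem?_append_left hk]
        simp only [computeMaxStep, hget]
      rw [hcongr, ih]
      -- the new step reads index (c0 :: rest').length, whose value is c
      have hgetc : PySem.List.pyGetD (c0 :: (rest' ++ [c])) ((c0 :: rest').length : Int) 0 = c := by
        rw [PySem.List.pyGetD_natCast,
            show (c0 :: (rest' ++ [c])) = (c0 :: rest') ++ [c] by simp]
        simp only [List.getD_eq_getElem?_getD, List.getElem?_concat_length, Option.getD_some]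
      set M' := rest'.foldl max c0 with hM'
      have hMnew : (rest' ++ [c]).foldl max c0 = max M' c := by
        rw [List.foldl_append]; rfl
      have hub : ∀ y ∈ c0 :: rest', y ≤ M' := by
        intro y hy
        rcases List.mem_cons.mp hy with rfl | hy
        · exact (PySem.List.le_foldl_max rest' y).1
        · exact (PySem.List.le_foldl_max rest' c0).2 y hy
      have hsel_app : ∀ m, selStates (c0 :: (rest' ++ [c])) us m =
          selStates (c0 :: rest') us m ++
            (if c = m then [PySem.List.pyGetD us ((c0 :: rest').length : Int) ""] else []) := by
        intro m
        unfold selStates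
        rw [show (c0 :: (rest' ++ [c])) = (c0 :: rest') ++ [c] by simp,
            PySem.List.enumerate_append, List.filterMap_append]
        congr 1
        simp only [PySem.List.enumerate, List.filterMap_cons, List.filterMap_nil]
        split <;> simp_all
      simp only [List.foldl_cons, List.foldl_nil, computeMaxStep, hgetc, hMnew]
      rcases lt_trichotomy c M' with hlt | heq | hgt
      · -- c < M': state unchanged, maximum unchanged, no new selected state
        have hs : selStates (c0 :: (rest' ++ [c])) us M' = selStates (c0 :: rest') us M' := by
          rw [hsel_app M', if_neg (ne_of_lt hlt), List.append_nil]
        rw [max_eq_left hlt.le, hs, if_neg (not_le.mpr hlt)]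
      · -- tie: append to both lists
        rw [heq] at hsel_app ⊢
        have hs : selStates (c0 :: (rest' ++ [M'])) us M'
            = selStates (c0 :: rest') us M' ++ [PySem.List.pyGetD us ((c0 :: rest').length : Int) ""] := by
          rw [hsel_app M', if_pos rfl]
        rw [max_self, hs, if_pos le_rfl, if_neg (lt_irrefl M')]
        simp [List.replicate_succ']
      · -- strict new maximum: reset both lists
        have hempty : selStates (c0 :: rest') us c = [] := by
          unfold selStates
          rw [List.filterMap_eq_nil_iff]
          intro p hp
          have hmem : p.2 ∈ c0 :: rest' := by
            have := PySem.List.map_snd_enumerate (c0 :: rest') 0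
            exact this ▸ List.mem_map_of_mem hp
          simp [ne_of_lt (lt_of_le_of_lt (hub _ hmem) hgt)]
        have hs : selStates (c0 :: (rest' ++ [c])) us c
            = [PySem.List.pyGetD us ((c0 :: rest').length : Int) ""] := by
          rw [hsel_app c, if_pos rfl, hempty, List.nil_append]
        rw [max_eq_right hgt.le, hs, if_pos hgt.le, if_pos hgt]
        simp

-- ===== VERDICT (by name: the statement is the Claim_ definition above) =====
theorem compute_max_spec : Claim_equal_compute_max := by
  intro change_array us_states _hdom hpre
  obtain ⟨hne, -⟩ := hpre
  obtain ⟨c0, rest, rfl⟩ : ∃ c0 rest, change_array = c0 :: rest := by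
    cases change_array with
    | nil => exact absurd rfl hne
    | cons a l => exact ⟨a, l, rfl⟩
  unfold Spec_compute_max compute_max compute_max_alt
  simp only [PySem.List.pyGetD_zero_cons]
  rw [computeMax_fold_char rest c0 us_states]
  simp only [PySem.List.max?_id_cons, Option.getD_some, selStates]
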